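-- pv_equiv track=rewrite | github.com/PinkPig97/officebench-seed-300-reference | verifier/checker.py | tokenize_formula
-- ===== SOURCE A (Python) =====
-- class EvaluationError(Exception):
--     pass
--
-- def tokenize_formula(expr: str) -> list[str]:
--     tokens: list[str] = []
--     i = 0
--     while i < len(expr):
--         ch = expr[i]
--         if ch.isspace():
--             i += 1
--             continue
--         if expr.startswith("<=", i) or expr.startswith(">=", i) or expr.startswith("<>", i):
--             tokens.append(expr[i : i + 2])
--             i += 2
--             continue
--         if ch in "(),:+-*/!<>=":
--             tokens.append(ch)
--             i += 1
--             continue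
--         if ch == '"':
--             j = i + 1
--             while j < len(expr) and expr[j] != '"':
--                 j += 1
--             if j >= len(expr):
--                 raise EvaluationError(f"unterminated string literal in formula: {expr}")
--             tokens.append(expr[i : j + 1])
--             i = j + 1
--             continue
--         j = i
--         while j < len(expr) and (expr[j].isalnum() or expr[j] in "._$"):
--             j += 1
--         if j == i:
--             raise EvaluationError(f"unsupported token in formula: {expr[i:]}")
--         tokens.append(expr[i:j])
--         i = j
--     return tokens
-- ===== SOURCE B (Python) =====
-- class EvaluationError(Exception):
--     pass
--
--
-- _TWO = ("<=", ">=", "<>")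
-- _OPS = "(),:+-*/!<>="
-- _WORD_EXTRA = "._$"
--
--
-- def tokenize_formula(expr: str) -> list[str]:
--     # Consume a reversed character stack with O(1) pops and one-char lookahead,
--     # instead of index arithmetic over the original string.
--     stack = list(reversed(expr))
--     tokens: list[str] = []
--     while stack:
--         ch = stack.pop()
--         if ch.isspace():
--             continue
--         if ch in "<>" and stack and ch + stack[-1] in _TWO:
--             tokens.append(ch + stack.pop())
--         elif ch in _OPS:
--             tokens.append(ch)
--         elif ch == '"':
--             body: list[str] = []
--             while stack and stack[-1] != '"':
--                 body.append(stack.pop())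
--             if not stack:
--                 raise EvaluationError(f"unterminated string literal in formula: {expr}")
--             stack.pop()
--             tokens.append('"' + "".join(body) + '"')
--         elif ch.isalnum() or ch in _WORD_EXTRA:
--             word = [ch]
--             while stack and (stack[-1].isalnum() or stack[-1] in _WORD_EXTRA):
--                 word.append(stack.pop())
--             tokens.append("".join(word))
--         else:
--             raise EvaluationError("unsupported token in formula: " + ch + "".join(reversed(stack)))
--     return tokens
-- ===== Notes on version B (the rewrite author's own statement) =====
-- stated objective: alternative
-- what changed: Replaces A's index-arithmetic scan (i/j cursors, startswith at offset, slice extraction) with a reversed-character stack consumed by O(1) pops with one-char lookahead, building each token from popped characters; Pre_ excludes exactly the inputs on which A raises EvaluationError (unterminated string literal, or an unsupported character outside a literal), where B raises the same errors.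
import Mathlib
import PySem

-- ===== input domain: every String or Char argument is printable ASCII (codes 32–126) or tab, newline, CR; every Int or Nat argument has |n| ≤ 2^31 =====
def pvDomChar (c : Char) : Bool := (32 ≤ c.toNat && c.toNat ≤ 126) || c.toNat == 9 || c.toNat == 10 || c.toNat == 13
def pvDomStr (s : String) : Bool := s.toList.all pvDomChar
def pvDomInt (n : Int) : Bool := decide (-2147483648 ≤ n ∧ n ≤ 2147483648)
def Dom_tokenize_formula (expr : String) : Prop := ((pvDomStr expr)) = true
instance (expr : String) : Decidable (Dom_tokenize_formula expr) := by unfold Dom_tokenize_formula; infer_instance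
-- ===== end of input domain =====

-- B replaces A's index-arithmetic scan with a reversed-character stack consumed by pops with
-- one-char lookahead (objective: alternative). Where either Python raises EvaluationError the
-- ports return the tokens accumulated so far; Pre_ excludes exactly those raising inputs.

-- ===== PORT A =====
-- the literal 'ch in "(),:+-*/!<>="' character class both Pythons use
def pvOps : List Char := "(),:+-*/!<>=".toList

-- A's inner loop `j = i + 1; while j < len(expr) and expr[j] != '"': j += 1`
def litEnd (l : List Char) (j : Nat) : Nat :=
  if h : j < l.length then (if l[j] == '"' then j else litEnd l (j + 1)) else j
termination_by l.length - j

-- A's inner loop `while j < len(expr) and (expr[j].isalnum() or expr[j] in "._$"): j += 1`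
def wordEnd (l : List Char) (j : Nat) : Nat :=
  if h : j < l.length then
    (if PySem.Chars.isalnum l[j] || l[j] == '.' || l[j] == '_' || l[j] == '$' then
      wordEnd l (j + 1) else j)
  else j
termination_by l.length - j

theorem le_litEnd (l : List Char) (j : Nat) : j ≤ litEnd l j := by
  unfold litEnd
  split
  · split
    · exact le_refl j
    · have := le_litEnd l (j + 1); omega
  · exact le_refl j
termination_by l.length - j

theorem le_wordEnd (l : List Char) (j : Nat) : j ≤ wordEnd l j := by
  unfold wordEnd
  split
  · split
    · have := le_wordEnd l (j + 1); omega
    · exact le_refl j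
  · exact le_refl j
termination_by l.length - j

-- A's while loop over the cursor i with the accumulating `tokens` list.
-- `expr.startswith("<=", i)` is ported exactly as `(l.drop i).take 2 = ['<', '=']`.
def scanA (l : List Char) (i : Nat) (tokens : List String) : List String :=
  if h : i < l.length then
    if PySem.Chars.isspace l[i] then scanA l (i + 1) tokens
    else if (l.drop i).take 2 = ['<', '='] ∨ (l.drop i).take 2 = ['>', '='] ∨
            (l.drop i).take 2 = ['<', '>'] then
      scanA l (i + 2) (tokens ++ [String.ofList ((l.drop i).take 2)])
    else if pvOps.contains l[i] then scanA l (i + 1) (tokens ++ [String.ofList [l[i]]])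
    else if l[i] == '"' then
      if l.length ≤ litEnd l (i + 1) then tokens   -- raise EvaluationError (unterminated string literal)
      else scanA l (litEnd l (i + 1) + 1)
             (tokens ++ [String.ofList ((l.drop i).take (litEnd l (i + 1) + 1 - i))])
    else
      if wordEnd l i = i then tokens               -- raise EvaluationError (unsupported token)
      else scanA l (wordEnd l i) (tokens ++ [String.ofList ((l.drop i).take (wordEnd l i - i))])
  else tokens
termination_by l.length - i
decreasing_by
  all_goals
    (have h1 := le_litEnd l (i + 1); have h2 := le_wordEnd l i; omega)

def tokenize_formula (expr : String) : List String := scanA expr.toList 0 []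

-- ===== PORT B =====
-- B pops `stack = list(reversed(expr))` from its end, i.e. consumes the characters of expr in
-- order: the Lean port consumes the char list head-first, which is exactly that stack.
def pvTwoNext (c : Char) : List Char → Bool
  | d :: _ => (c == '<' && d == '=') || (c == '>' && d == '=') || (c == '<' && d == '>')
  | [] => false

def pvWordChar (c : Char) : Bool :=
  PySem.Chars.isalnum c || c == '.' || c == '_' || c == '$'

def scanB : List Char → List String
  | [] => []
  | c :: s =>
    if PySem.Chars.isspace c then scanB s
    else if (c == '<' || c == '>') && pvTwoNext c s then
      match s with
      | d :: s' => String.ofList [c, d] :: scanB s'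
      | [] => []   -- unreachable: pvTwoNext c [] = false
    else if pvOps.contains c then String.ofList [c] :: scanB s
    else if c == '"' then
      let body := s.takeWhile (· != '"')
      match h : s.dropWhile (· != '"') with
      | [] => []   -- raise EvaluationError (unterminated string literal)
      | _ :: rest => String.ofList ('"' :: (body ++ ['"'])) :: scanB rest
    else if pvWordChar c then
      String.ofList (c :: s.takeWhile pvWordChar) :: scanB (s.dropWhile pvWordChar)
    else []        -- raise EvaluationError (unsupported token)
termination_by l => l.length
decreasing_by
  all_goals
    first
      | (have h1 := List.length_dropWhile_le (p := (· != '"')) (l := s)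
         rw [h] at h1; simp at h1 ⊢; omega)
      | (have h1 := List.length_dropWhile_le (p := pvWordChar) (l := s)
         simp; omega)
      | simp

def tokenize_formula_alt (expr : String) : List String := scanB expr.toList

-- ===== PRECONDITION & SPEC =====
-- Pre_ holds exactly when A returns (raises no EvaluationError): the number of '"' characters
-- is even (every string literal is terminated) and every character that lies outside a string
-- literal (even number of '"' before it) and is not a quote belongs to the token alphabet.
def pvAllowed (c : Char) : Bool :=
  PySem.Chars.isspace c || pvOps.contains c || pvWordChar c

def Pre_tokenize_formula (expr : String) : Prop :=
  (expr.toList.count '"') % 2 = 0 ∧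
  ∀ i < expr.toList.length,
    ((expr.toList.take i).count '"') % 2 = 0 →
    expr.toList.getD i ' ' ≠ '"' →
    pvAllowed (expr.toList.getD i ' ') = true
instance (expr : String) : Decidable (Pre_tokenize_formula expr) := by
  unfold Pre_tokenize_formula; infer_instance

def pvWitness_tokenize_formula : String := "IF(a1 <= 2, \"x y!\", total_9.5+b)"

def Spec_tokenize_formula (expr : String) (out : List String) : Prop := out = tokenize_formula_alt expr
instance (expr : String) (out : List String) : Decidable (Spec_tokenize_formula expr out) := by unfold Spec_tokenize_formula; infer_instance

-- ===== CLAIM (what is proved, stated in full; the proofs are below) =====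
def Claim_equal_tokenize_formula : Prop := ∀ (expr : String), Dom_tokenize_formula expr → Pre_tokenize_formula expr → Spec_tokenize_formula expr (tokenize_formula expr)

-- ===== LEMMAS AND PROOFS =====

-- A's two-char-operator test is B's lookahead test
theorem pvTwoIff (c : Char) (s : List Char) :
    ((c :: s).take 2 = ['<', '='] ∨ (c :: s).take 2 = ['>', '='] ∨ (c :: s).take 2 = ['<', '>'])
    ↔ ((c == '<' || c == '>') && pvTwoNext c s) = true := by
  cases s <;> simp [pvTwoNext] <;> tauto

theorem pvTakeTakeWhile (p : Char → Bool) (l : List Char) :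
    l.take (l.takeWhile p).length = l.takeWhile p := by
  conv_lhs => rw [← List.takeWhile_append_dropWhile (p := p) (l := l)]
  simpa using List.take_length_add_append (l₁ := l.takeWhile p) (l₂ := l.dropWhile p) 0

theorem pvDropWhileHead (p : Char → Bool) (l r : List Char) (d : Char)
    (h : l.dropWhile p = d :: r) : p d = false := by
  simpa [h] using List.head_dropWhile_not p (l := l) (by simp [h])

-- A's inner literal loop lands where B's dropWhile lands
theorem litEnd_eq (l : List Char) (j : Nat) :
    litEnd l j = j + ((l.drop j).takeWhile (· != '"')).length := by
  rw [litEnd]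
  split
  · next h =>
    rw [List.drop_eq_getElem_cons h, List.takeWhile_cons]
    split
    · next hq =>
      have hb : (l[j] != '"') = false := by simp_all
      rw [hb]; simp
    · next hq =>
      have hb : (l[j] != '"') = true := by simp_all
      have ih := litEnd_eq l (j + 1)
      simp [hb]
      omega
  · next h => rw [List.drop_eq_nil_of_le (by omega)]; simp
termination_by l.length - j

-- A's inner word loop lands where B's dropWhile lands
theorem wordEnd_eq (l : List Char) (j : Nat) :
    wordEnd l j = j + ((l.drop j).takeWhile pvWordChar).length := by
  rw [wordEnd]
  split
  · next h =>
    rw [List.drop_eq_getElem_cons h, List.takeWhile_cons]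
    split
    · next hq =>
      have hb : pvWordChar l[j] = true := by simp_all [pvWordChar]
      have ih := wordEnd_eq l (j + 1)
      simp [hb]
      omega
    · next hq =>
      have hb : pvWordChar l[j] = false := by
        simp only [pvWordChar]; simp_all
      rw [hb]; simp
  · next h => rw [List.drop_eq_nil_of_le (by omega)]; simp
termination_by l.length - j

-- one-step evaluation of scanB under each branch condition
theorem scanB_space (c : Char) (s : List Char) (h : PySem.Chars.isspace c = true) :
    scanB (c :: s) = scanB s := by
  rw [scanB.eq_def]; simp [h]

theorem scanB_two (c d : Char) (s : List Char) (hsp : ¬ PySem.Chars.isspace c = true)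
    (hb : ((c == '<' || c == '>') && pvTwoNext c (d :: s)) = true) :
    scanB (c :: d :: s) = String.ofList [c, d] :: scanB s := by
  rw [scanB.eq_def]; simp [hsp, hb]

theorem scanB_ops (c : Char) (s : List Char) (hsp : ¬ PySem.Chars.isspace c = true)
    (hb : ¬ ((c == '<' || c == '>') && pvTwoNext c s) = true)
    (hops : pvOps.contains c = true) :
    scanB (c :: s) = String.ofList [c] :: scanB s := by
  rw [scanB.eq_def]; simp [hsp, hb]
  intro hmem; exact absurd (by simpa using hops : c ∈ pvOps) hmem

theorem scanB_lit_nil (s : List Char) (h : s.dropWhile (· != '"') = []) :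
    scanB ('"' :: s) = [] := by
  have e1 : PySem.Chars.isspace '"' = false := by decide
  have e3 : ('"' : Char) ∉ pvOps := by decide
  rw [scanB.eq_def]
  simp only [e1, e3, Bool.false_eq_true, if_false, reduceIte]
  simp [pvTwoNext]
  rw [if_neg e3]
  split
  · rfl
  · rename_i head rest heq
    rw [h] at heq; simp at heq

theorem scanB_lit_cons (s r : List Char) (d : Char) (h : s.dropWhile (· != '"') = d :: r) :
    scanB ('"' :: s) = String.ofList ('"' :: (s.takeWhile (· != '"') ++ ['"'])) :: scanB r := by
  have e1 : PySem.Chars.isspace '"' = false := by decide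
  have e3 : ('"' : Char) ∉ pvOps := by decide
  rw [scanB.eq_def]
  simp only [e1, e3, Bool.false_eq_true, if_false, reduceIte]
  simp [pvTwoNext]
  rw [if_neg e3]
  split
  · rename_i heq
    rw [h] at heq; simp at heq
  · rename_i head rest heq
    rw [h] at heq; cases heq; rfl

theorem scanB_word (c : Char) (s : List Char) (hsp : ¬ PySem.Chars.isspace c = true)
    (hb : ¬ ((c == '<' || c == '>') && pvTwoNext c s) = true)
    (hops : ¬ pvOps.contains c = true) (hq : ¬ (c == '"') = true)
    (hw : pvWordChar c = true) :
    scanB (c :: s) = String.ofList (c :: s.takeWhile pvWordChar) :: scanB (s.dropWhile pvWordChar) := by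
  rw [scanB.eq_def]; simp [hsp, hb, hq, hw]
  intro hmem; exact absurd hmem (by simpa using hops)

theorem scanB_bad (c : Char) (s : List Char) (hsp : ¬ PySem.Chars.isspace c = true)
    (hb : ¬ ((c == '<' || c == '>') && pvTwoNext c s) = true)
    (hops : ¬ pvOps.contains c = true) (hq : ¬ (c == '"') = true)
    (hw : ¬ pvWordChar c = true) :
    scanB (c :: s) = [] := by
  rw [scanB.eq_def]; simp [hsp, hb, hq, hw]
  simpa using hops

theorem pvLitToken (s tw rest : List Char) (d : Char) (htwdw : tw ++ d :: rest = s)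
    (hdq : d = '"') : ('"' :: s).take (tw.length + 2) = '"' :: (tw ++ ['"']) := by
  subst hdq
  rw [← htwdw, show tw.length + 2 = tw.length + 1 + 1 from by omega, List.take_succ_cons]
  congr 1
  simpa using List.take_length_add_append (l₁ := tw) (l₂ := '"' :: rest) 1

theorem pvLitDrop (s tw rest : List Char) (d : Char) (htwdw : tw ++ d :: rest = s) :
    s.drop (tw.length + 1) = rest := by
  rw [← htwdw]
  simpa using List.drop_length_add_append (l₁ := tw) (l₂ := d :: rest) 1

theorem scanA_eq_scanB (l : List Char) (i : Nat) (tokens : List String) :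
    scanA l i tokens = tokens ++ scanB (l.drop i) := by
  rw [scanA]
  split
  case isFalse h => rw [List.drop_eq_nil_of_le (by omega)]; rw [scanB.eq_def]; simp
  case isTrue h =>
  have hd : l.drop i = l[i] :: l.drop (i + 1) := List.drop_eq_getElem_cons h
  by_cases hsp : PySem.Chars.isspace l[i] = true
  · rw [if_pos hsp, hd, scanB_space _ _ hsp]
    exact scanA_eq_scanB l (i + 1) tokens
  · rw [if_neg hsp]
    by_cases htw : ((l.drop i).take 2 = ['<', '='] ∨ (l.drop i).take 2 = ['>', '='] ∨
        (l.drop i).take 2 = ['<', '>'])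
    · rw [if_pos htw]
      have hb := (pvTwoIff l[i] (l.drop (i + 1))).mp (by rwa [hd] at htw)
      cases hs : l.drop (i + 1) with
      | nil => rw [hs] at hd; rw [hd] at htw; simp [List.take] at htw
      | cons d s' =>
        rw [hs] at hd hb
        have hdrop2 : l.drop (i + 2) = s' := by
          rw [← List.tail_drop, hs]; rfl
        rw [hd, scanA_eq_scanB l (i + 2) _, hdrop2, scanB_two _ _ _ hsp hb]
        simp [List.take]
    · rw [if_neg htw]
      have hb : ¬ ((l[i] == '<' || l[i] == '>') && pvTwoNext l[i] (l.drop (i + 1))) = true := by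
        intro hc; exact htw (by rw [hd]; exact (pvTwoIff _ _).mpr hc)
      by_cases hops : pvOps.contains l[i] = true
      · rw [if_pos hops, hd, scanB_ops _ _ hsp hb hops,
            scanA_eq_scanB l (i + 1) (tokens ++ [String.ofList [l[i]]])]
        simp
      · rw [if_neg hops]
        by_cases hq : (l[i] == '"') = true
        · rw [if_pos hq]
          have hcq : l[i] = '"' := by simpa using hq
          have hle := litEnd_eq l (i + 1)
          have hlen : (l.drop (i + 1)).length = l.length - (i + 1) := List.length_drop
          have htwdw := List.takeWhile_append_dropWhile (p := (· != '"')) (l := l.drop (i + 1))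
          cases hdw : (l.drop (i + 1)).dropWhile (· != '"') with
          | nil =>
            have hcond : l.length ≤ litEnd l (i + 1) := by
              rw [hdw] at htwdw
              simp only [List.append_nil] at htwdw
              rw [htwdw] at hle
              omega
            rw [if_pos hcond, hd, hcq, scanB_lit_nil _ hdw]
            simp
          | cons d rest =>
            rw [hdw] at htwdw
            have hlt : ((l.drop (i + 1)).takeWhile (· != '"')).length + (rest.length + 1)
                = (l.drop (i + 1)).length := by
              have hlen2 := congrArg List.length htwdw
              simp at hlen2
              omega
            have hcond : ¬ l.length ≤ litEnd l (i + 1) := by rw [hle]; omega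
            rw [if_neg hcond]
            have hdq : d = '"' := by
              have := pvDropWhileHead _ _ _ _ hdw; simpa using this
            have htok : (l.drop i).take (litEnd l (i + 1) + 1 - i)
                = '"' :: ((l.drop (i + 1)).takeWhile (· != '"') ++ ['"']) := by
              rw [hd, hcq, hle,
                show i + 1 + ((l.drop (i + 1)).takeWhile (· != '"')).length + 1 - i
                  = ((l.drop (i + 1)).takeWhile (· != '"')).length + 2 from by omega]
              exact pvLitToken _ _ _ _ htwdw hdq
            have hdd : ((l.drop (i + 1)).drop
                  (((l.drop (i + 1)).takeWhile (· != '"')).length + 1) : List Char)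
                = l.drop (i + 1 + (((l.drop (i + 1)).takeWhile (· != '"')).length + 1)) :=
              List.drop_drop
            have hdroprec : l.drop (litEnd l (i + 1) + 1) = rest := by
              rw [hle,
                show i + 1 + ((l.drop (i + 1)).takeWhile (· != '"')).length + 1
                  = i + 1 + (((l.drop (i + 1)).takeWhile (· != '"')).length + 1) from by omega,
                ← hdd]
              exact pvLitDrop _ _ _ _ htwdw
            rw [htok, hd, hcq, scanB_lit_cons _ _ _ hdw,
                scanA_eq_scanB l (litEnd l (i + 1) + 1) _, hdroprec]
            simp
        · rw [if_neg hq]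
          have hwe := wordEnd_eq l i
          by_cases hw : pvWordChar l[i] = true
          · have htk : (l.drop i).takeWhile pvWordChar
                = l[i] :: (l.drop (i + 1)).takeWhile pvWordChar := by
              rw [hd, List.takeWhile_cons, if_pos hw]
            have hcond : ¬ wordEnd l i = i := by
              rw [hwe, htk]; simp only [List.length_cons]; omega
            rw [if_neg hcond]
            have htok : (l.drop i).take (wordEnd l i - i)
                = l[i] :: (l.drop (i + 1)).takeWhile pvWordChar := by
              rw [hwe, Nat.add_sub_cancel_left, pvTakeTakeWhile, htk]
            have hdw0 : (l.drop i).drop ((l.drop i).takeWhile pvWordChar).length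
                = (l.drop i).dropWhile pvWordChar := by
              have hsplit := List.takeWhile_append_dropWhile (p := pvWordChar) (l := l.drop i)
              have hdla := List.drop_length_add_append
                (l₁ := (l.drop i).takeWhile pvWordChar) (l₂ := (l.drop i).dropWhile pvWordChar) 0
              rw [hsplit] at hdla
              simpa using hdla
            have hdd2 : ((l.drop i).drop ((l.drop i).takeWhile pvWordChar).length : List Char)
                = l.drop (i + ((l.drop i).takeWhile pvWordChar).length) := List.drop_drop
            have hdroprec : l.drop (wordEnd l i) = (l.drop (i + 1)).dropWhile pvWordChar := by
              rw [hwe, ← hdd2, hdw0, hd, List.dropWhile_cons, if_pos hw]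
            rw [htok, scanA_eq_scanB l (wordEnd l i) _, hdroprec, hd,
                scanB_word _ _ hsp hb hops hq hw]
            simp
          · have hcond : wordEnd l i = i := by
              rw [hwe, hd, List.takeWhile_cons, if_neg (by simpa using hw)]
              simp
            rw [if_pos hcond, hd, scanB_bad _ _ hsp hb hops hq hw]
            simp
termination_by l.length - i
decreasing_by
  all_goals
    (have h1 := le_litEnd l (i + 1); have h2 := le_wordEnd l i; omega)

-- ===== VERDICT (by name: the statement is the Claim_ definition above) =====
theorem tokenize_formula_spec : Claim_equal_tokenize_formula := by
  intro expr _ _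
  unfold Spec_tokenize_formula tokenize_formula tokenize_formula_alt
  simpa using scanA_eq_scanB expr.toList 0 []
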